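-- pv_equiv track=rewrite | github.com/romankurnovskii/leetcode-apps | solutions/3725/01.py | countWays
-- ===== SOURCE A (Python) =====
-- from typing import List
--
-- def countWays(grid: List[List[int]]) -> int:
--     def gcd(a, b):
--         while b:
--             a, b = b, a % b
--         return a
--
--     def coprime(a, b):
--         return gcd(a, b) == 1
--
--     m, n = len(grid), len(grid[0])
--     res = 0
--
--     for i in range(m):
--         for j in range(n):
--             for x in range(m):
--                 for y in range(n):
--                     if (i, j) != (x, y) and coprime(grid[i][j], grid[x][y]):
--                         res += 1
--
--     return res // 2
-- ===== SOURCE B (Python) =====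
-- from typing import List
--
-- def countWays(grid: List[List[int]]) -> int:
--     def gcd(a, b):
--         while b:
--             a, b = b, a % b
--         return a
--
--     m, n = len(grid), len(grid[0])
--     freq = {}
--     for i in range(m):
--         for j in range(n):
--             v = grid[i][j]
--             freq[v] = freq.get(v, 0) + 1
--
--     ordered = 0
--     for u, cu in freq.items():
--         for v, cv in freq.items():
--             if gcd(u, v) == 1:
--                 ordered += cu * cv if u != v else cu * (cu - 1)
--     return ordered // 2
-- ===== Notes on version B (the rewrite author's own statement) =====
-- stated objective: faster
-- what changed: B replaces A's quadruple loop over ordered cell pairs by one pass that builds a value-frequency dictionary and a double loop over the distinct values weighted by multiplicities, so duplicate values collapse into a single gcd test per ordered value pair; Pre_ excludes only the inputs on which A raises IndexError (empty grid, or a row shorter than the first row), where B raises too.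
import Mathlib
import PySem

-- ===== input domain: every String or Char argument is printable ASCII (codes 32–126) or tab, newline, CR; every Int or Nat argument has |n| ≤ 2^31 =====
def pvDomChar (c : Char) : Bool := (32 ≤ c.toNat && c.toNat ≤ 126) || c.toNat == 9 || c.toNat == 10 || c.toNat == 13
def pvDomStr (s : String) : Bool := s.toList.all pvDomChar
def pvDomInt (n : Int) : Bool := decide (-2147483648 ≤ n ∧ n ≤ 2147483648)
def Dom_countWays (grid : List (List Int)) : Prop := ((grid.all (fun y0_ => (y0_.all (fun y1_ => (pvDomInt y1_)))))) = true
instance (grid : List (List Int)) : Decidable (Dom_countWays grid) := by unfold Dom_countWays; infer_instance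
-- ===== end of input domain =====

-- B replaces A's quadruple loop over ordered cell pairs by one pass building a value-frequency
-- dictionary and a double loop over distinct values weighted by multiplicities (objective:
-- faster where values repeat; duplicate values collapse into one dictionary entry).


-- ===== PORT A =====
-- termination of Python's Euclid loop: |a % b| < |b| for b ≠ 0
lemma pvModNatAbsLt (a b : Int) (hb : b ≠ 0) : (PySem.Int.mod a b).natAbs < b.natAbs := by
  rcases lt_or_gt_of_ne hb with h | h
  · have := PySem.Int.mod_neg_bounds a h
    omega
  · have h1 := PySem.Int.mod_nonneg a h
    have h2 := PySem.Int.mod_lt a h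
    omega

-- 'while b: a, b = b, a % b; return a' (Python '%' = PySem.Int.mod); shared by both ports
def pygcd (a b : Int) : Int :=
  if h : b = 0 then a else pygcd b (PySem.Int.mod a b)
termination_by b.natAbs
decreasing_by exact pvModNatAbsLt a b h

-- grid[i][j]; indices are always in range under Pre_, so the defaults are never used there
def pvCell (grid : List (List Int)) (i j : Int) : Int :=
  PySem.List.pyGetD (PySem.List.pyGetD grid i []) j 0

def countWays (grid : List (List Int)) : Int :=
  let m : Int := grid.length
  let n : Int := (PySem.List.pyGetD grid 0 []).length
  let res : Int :=
    (PySem.List.pyRange 0 m 1).foldl (fun res i =>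
      (PySem.List.pyRange 0 n 1).foldl (fun res j =>
        (PySem.List.pyRange 0 m 1).foldl (fun res x =>
          (PySem.List.pyRange 0 n 1).foldl (fun res y =>
            if (i, j) ≠ (x, y) ∧ pygcd (pvCell grid i j) (pvCell grid x y) = 1
            then res + 1 else res) res) res) res) 0
  PySem.Int.floordiv res 2

-- ===== PORT B =====
def countWays_alt (grid : List (List Int)) : Int :=
  let m : Int := grid.length
  let n : Int := (PySem.List.pyGetD grid 0 []).length
  let freq : PySem.Dict Int Int :=
    (PySem.List.pyRange 0 m 1).foldl (fun d i =>
      (PySem.List.pyRange 0 n 1).foldl (fun d j =>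
        let v := pvCell grid i j
        d.insert v (d.getD v 0 + 1)) d) PySem.Dict.empty
  let ordered : Int :=
    freq.items.foldl (fun acc p =>
      freq.items.foldl (fun acc q =>
        if pygcd p.1 q.1 = 1
        then acc + (if p.1 ≠ q.1 then p.2 * q.2 else p.2 * (p.2 - 1))
        else acc) acc) 0
  PySem.Int.floordiv ordered 2

-- ===== PRECONDITION & SPEC =====
-- Pre_ excludes exactly the inputs on which A raises IndexError: the empty grid (grid[0]) and
-- grids with a row shorter than the first row (grid[x][y]); B raises there as well.
def Pre_countWays (grid : List (List Int)) : Prop :=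
  grid ≠ [] ∧ ∀ r ∈ grid, (grid.headD []).length ≤ r.length
instance (grid : List (List Int)) : Decidable (Pre_countWays grid) := by
  unfold Pre_countWays; infer_instance

def pvWitness_countWays : List (List Int) := [[1, 2], [3, 4]]

def Spec_countWays (grid : List (List Int)) (out : Int) : Prop := out = countWays_alt grid
instance (grid : List (List Int)) (out : Int) : Decidable (Spec_countWays grid out) := by
  unfold Spec_countWays; infer_instance

-- ===== CLAIM (what is proved, stated in full; the proofs are below) =====
def Claim_equal_countWays : Prop :=
  ∀ (grid : List (List Int)), Dom_countWays grid → Pre_countWays grid →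
    Spec_countWays grid (countWays grid)

-- ===== LEMMAS AND PROOFS =====
-- 0/1 indicator of the ports' shared coprimality test
def pvC (a b : Int) : Int := if pygcd a b = 1 then 1 else 0

lemma pv_sum_map_sub {α : Type} (l : List α) (f g : α → Int) :
    (l.map (fun x => f x - g x)).sum = (l.map f).sum - (l.map g).sum := by
  induction l with
  | nil => simp
  | cons a t ih => simp [ih]; ring

lemma pv_sum_map_mul_left {α : Type} (l : List α) (c : Int) (f : α → Int) :
    (l.map (fun x => c * f x)).sum = c * (l.map f).sum := by
  induction l with
  | nil => simp
  | cons a t ih => simp [ih]; ring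

lemma pv_sum_delta_zero {α : Type} [DecidableEq α] (K : List α) (a : α)
    (ha : a ∉ K) (f : α → Int) :
    (K.map (fun u => if a = u then f u else 0)).sum = 0 := by
  induction K with
  | nil => simp
  | cons u t ih =>
    have hau : a ≠ u := by intro h; exact ha (h ▸ List.mem_cons_self)
    have hat : a ∉ t := fun h => ha (List.mem_cons_of_mem _ h)
    simp [hau, ih hat]

lemma pv_sum_delta {α : Type} [DecidableEq α] (K : List α) (hK : K.Nodup) (a : α)
    (ha : a ∈ K) (f : α → Int) :
    (K.map (fun u => if a = u then f u else 0)).sum = f a := by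
  induction K with
  | nil => cases ha
  | cons u t ih =>
    rcases List.nodup_cons.mp hK with ⟨hu, ht⟩
    by_cases h : a = u
    · subst h
      simp [pv_sum_delta_zero t a hu f]
    · have hat : a ∈ t := by
        rcases List.mem_cons.mp ha with h' | h'
        · exact absurd h' h
        · exact h'
      simp only [List.map_cons, List.sum_cons, if_neg h, zero_add]
      exact ih ht hat

lemma pv_count_sum (l K : List Int) (hK : K.Nodup) (hmem : ∀ a ∈ l, a ∈ K)
    (f : Int → Int) :
    (K.map (fun u => (List.count u l : Int) * f u)).sum = (l.map f).sum := by
  induction l with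
  | nil => simp
  | cons a t ih =>
    have hmem' : ∀ b ∈ t, b ∈ K := fun b hb => hmem b (List.mem_cons_of_mem _ hb)
    have hpt : ∀ u ∈ K, (List.count u (a :: t) : Int) * f u
        = (List.count u t : Int) * f u + (if a = u then f u else 0) := by
      intro u _
      by_cases h : u = a
      · subst h
        simp
        ring
      · have : ¬ (a = u) := fun h' => h h'.symm
        simp [this]
    rw [List.map_congr_left hpt, PySem.List.sum_map_add_int,
        ih hmem', pv_sum_delta K hK a (hmem a List.mem_cons_self) f]
    simp [add_comm]

lemma pv_map_range_getD {α β : Type} (n : Nat) (l : List α) (d : α) (f : α → β)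
    (hn : n ≤ l.length) :
    (List.range n).map (fun k => f (l.getD k d)) = (l.take n).map f := by
  induction n with
  | zero => simp
  | succ m ih =>
    have hml : m < l.length := by omega
    rw [List.range_succ, List.map_append, ih (by omega)]
    have h1 : List.map (fun k => f (l.getD k d)) [m] = [f l[m]] := by
      simp [List.getD, List.getElem?_eq_getElem hml]
    rw [h1, List.take_add_one, List.getElem?_eq_getElem hml]
    simp only [Option.toList_some, List.map_append, List.map_cons, List.map_nil]

lemma pv_row_transfer (n : Nat) (row : List Int) (f : Int → Int) (hn : n ≤ row.length) :
    ((PySem.List.pyRange 0 (n : Int) 1).map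
        (fun y => f (PySem.List.pyGetD row y 0))).sum = ((row.take n).map f).sum := by
  rw [PySem.List.pyRange_zero_natCast, List.map_map]
  have h : ((fun y => f (PySem.List.pyGetD row y 0)) ∘ fun k : Nat => (k : Int))
      = fun k : Nat => f (row.getD k 0) := by
    funext k
    simp [Function.comp, PySem.List.pyGetD_natCast]
  rw [h, pv_map_range_getD n row 0 f hn]

lemma pv_flat_sum (grid : List (List Int)) (g : List Int → List Int) (f : Int → Int) :
    (grid.map (fun row => ((g row).map f).sum)).sum
      = ((grid.flatMap g).map f).sum := by
  induction grid with
  | nil => simp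
  | cons r t ih => simp [List.flatMap_cons, ih]

lemma pv_grid_transfer (grid : List (List Int)) (N : Nat)
    (hrect : ∀ row ∈ grid, N ≤ row.length) (f : Int → Int) :
    ((PySem.List.pyRange 0 (grid.length : Int) 1).map (fun x =>
        ((PySem.List.pyRange 0 (N : Int) 1).map
          (fun y => f (pvCell grid x y))).sum)).sum
      = ((grid.flatMap (fun row => row.take N)).map f).sum := by
  rw [PySem.List.pyRange_zero_natCast grid.length, List.map_map]
  have hpt : ∀ k ∈ List.range grid.length,
      ((fun x => ((PySem.List.pyRange 0 (N : Int) 1).map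
          (fun y => f (pvCell grid x y))).sum) ∘ fun k : Nat => (k : Int)) k
        = (((grid.getD k []).take N).map f).sum := by
    intro k hk
    have hk' : k < grid.length := List.mem_range.mp hk
    have hrow : (grid.getD k []) ∈ grid := by
      rw [List.getD_eq_getElem grid [] hk']
      exact List.getElem_mem hk'
    have hcell : ∀ y : Int, pvCell grid (k : Int) y
        = PySem.List.pyGetD (grid.getD k []) y 0 := by
      intro y
      simp [pvCell, PySem.List.pyGetD_natCast]
    simp only [Function.comp, hcell]
    exact pv_row_transfer N (grid.getD k []) f (hrect _ hrow)
  rw [List.map_congr_left hpt,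
      pv_map_range_getD grid.length grid [] (fun row => ((row.take N).map f).sum) le_rfl,
      List.take_length]
  exact pv_flat_sum grid (fun row => row.take N) f

lemma pv_nodup_pyRange (n : Nat) : (PySem.List.pyRange 0 (n : Int) 1).Nodup := by
  rw [PySem.List.pyRange_zero_natCast]
  exact (List.nodup_range).map (fun a b h => by exact_mod_cast h)

lemma pv_double_delta (K L : List Int) (hK : K.Nodup) (hL : L.Nodup) {i j : Int}
    (hi : i ∈ K) (hj : j ∈ L) (g : Int → Int → Int) :
    (K.map (fun x => (L.map (fun y => if (i, j) = (x, y) then g x y else 0)).sum)).sum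
      = g i j := by
  have hinner : ∀ x ∈ K, (L.map (fun y => if (i, j) = (x, y) then g x y else 0)).sum
      = if i = x then g x j else 0 := by
    intro x _
    by_cases hx : i = x
    · subst hx
      have hpt : ∀ y ∈ L, (if (i, j) = (i, y) then g i y else 0)
          = (if j = y then g i y else 0) := by
        intro y _
        simp [Prod.mk.injEq]
      rw [List.map_congr_left hpt, pv_sum_delta L hL j hj (fun y => g i y)]
      simp
    · have hpt : ∀ y ∈ L, (if (i, j) = (x, y) then g x y else 0) = 0 := by
        intro y _
        simp [Prod.mk.injEq, hx]
      rw [List.map_congr_left hpt]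
      simp [hx]
  rw [List.map_congr_left hinner, pv_sum_delta K hK i hi (fun x => g x j)]

lemma pv_inner (grid : List (List Int)) (N : Nat) (i j : Int)
    (hrect : ∀ row ∈ grid, N ≤ row.length)
    (hi : i ∈ PySem.List.pyRange 0 (grid.length : Int) 1)
    (hj : j ∈ PySem.List.pyRange 0 (N : Int) 1) :
    ((PySem.List.pyRange 0 (grid.length : Int) 1).map (fun x =>
      ((PySem.List.pyRange 0 (N : Int) 1).map (fun y =>
        if (i, j) ≠ (x, y) ∧ pygcd (pvCell grid i j) (pvCell grid x y) = 1
        then (1 : Int) else 0)).sum)).sum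
    = ((grid.flatMap (fun row => row.take N)).map (fun b => pvC (pvCell grid i j) b)).sum
      - pvC (pvCell grid i j) (pvCell grid i j) := by
  have hpt2 : ∀ (x y : Int),
      (if (i, j) ≠ (x, y) ∧ pygcd (pvCell grid i j) (pvCell grid x y) = 1
        then (1 : Int) else 0)
      = (if pygcd (pvCell grid i j) (pvCell grid x y) = 1 then (1 : Int) else 0)
        - (if (i, j) = (x, y)
            then (if pygcd (pvCell grid i j) (pvCell grid x y) = 1 then (1 : Int) else 0)
            else 0) := by
    intro x y
    by_cases hE : (i, j) = (x, y) <;>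
      by_cases hP : pygcd (pvCell grid i j) (pvCell grid x y) = 1 <;>
        simp [hE, hP]
  have hstep : ∀ x ∈ PySem.List.pyRange 0 (grid.length : Int) 1,
      ((PySem.List.pyRange 0 (N : Int) 1).map (fun y =>
        if (i, j) ≠ (x, y) ∧ pygcd (pvCell grid i j) (pvCell grid x y) = 1
        then (1 : Int) else 0)).sum
      = ((PySem.List.pyRange 0 (N : Int) 1).map (fun y =>
          if pygcd (pvCell grid i j) (pvCell grid x y) = 1 then (1 : Int) else 0)).sum
        - ((PySem.List.pyRange 0 (N : Int) 1).map (fun y =>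
            if (i, j) = (x, y)
            then (if pygcd (pvCell grid i j) (pvCell grid x y) = 1 then (1 : Int) else 0)
            else 0)).sum := by
    intro x _
    rw [← pv_sum_map_sub]
    exact congrArg _ (List.map_congr_left (fun y _ => hpt2 x y))
  rw [List.map_congr_left hstep, pv_sum_map_sub,
      pv_grid_transfer grid N hrect (fun b => if pygcd (pvCell grid i j) b = 1 then (1 : Int) else 0),
      pv_double_delta _ _ (pv_nodup_pyRange grid.length) (pv_nodup_pyRange N) hi hj
        (fun x y => if pygcd (pvCell grid i j) (pvCell grid x y) = 1 then (1 : Int) else 0)]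
  simp [pvC]

lemma pv_fold4 (K L : List Int) (p : Int → Int → Int → Int → Prop)
    [inst : ∀ i j x y, Decidable (p i j x y)] :
    K.foldl (fun res i => L.foldl (fun res j => K.foldl (fun res x =>
      L.foldl (fun res y => if p i j x y then res + 1 else res) res) res) res) (0 : Int)
    = (K.map (fun i => (L.map (fun j => (K.map (fun x =>
        (L.map (fun y => if p i j x y then (1 : Int) else 0)).sum)).sum)).sum)).sum := by
  have h1 : ∀ (i j x a : Int),
      L.foldl (fun res y => if p i j x y then res + 1 else res) a
      = a + (L.map (fun y => if p i j x y then (1 : Int) else 0)).sum := by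
    intro i j x a
    rw [PySem.List.foldl_ite_add_one (p i j x),
        ← PySem.List.sum_map_ite_one_zero (fun y => decide (p i j x y))]
    simp only [decide_eq_true_eq]
  have h2 : ∀ (i j a : Int),
      K.foldl (fun res x => L.foldl (fun res y => if p i j x y then res + 1 else res) res) a
      = a + (K.map (fun x => (L.map (fun y => if p i j x y then (1 : Int) else 0)).sum)).sum := by
    intro i j a
    rw [PySem.List.foldl_congr_mem K _
        (fun res x => res + (L.map (fun y => if p i j x y then (1 : Int) else 0)).sum) a
        (by intro acc x _; exact h1 i j x acc),
      PySem.List.foldl_add]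
  have h3 : ∀ (i a : Int),
      L.foldl (fun res j => K.foldl (fun res x =>
        L.foldl (fun res y => if p i j x y then res + 1 else res) res) res) a
      = a + (L.map (fun j => (K.map (fun x =>
          (L.map (fun y => if p i j x y then (1 : Int) else 0)).sum)).sum)).sum := by
    intro i a
    rw [PySem.List.foldl_congr_mem L _
        (fun res j => res + (K.map (fun x =>
          (L.map (fun y => if p i j x y then (1 : Int) else 0)).sum)).sum) a
        (by intro acc x _; exact h2 i x acc),
      PySem.List.foldl_add]
  rw [PySem.List.foldl_congr_mem K _
      (fun res i => res + (L.map (fun j => (K.map (fun x =>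
        (L.map (fun y => if p i j x y then (1 : Int) else 0)).sum)).sum)).sum) 0
      (by intro acc i _; exact h3 i acc),
    PySem.List.foldl_add, zero_add]

lemma countWays_eq (r : List Int) (t : List (List Int))
    (hrect : ∀ row ∈ r :: t, r.length ≤ row.length) :
    countWays (r :: t) = PySem.Int.floordiv
      ((((r :: t).flatMap (fun row => row.take r.length)).map (fun a =>
          (((r :: t).flatMap (fun row => row.take r.length)).map
            (fun b => pvC a b)).sum - pvC a a)).sum) 2 := by
  have hg0 : PySem.List.pyGetD (r :: t) (0 : Int) [] = r := by
    simp
  unfold countWays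
  dsimp only
  rw [hg0]
  rw [pv_fold4 (PySem.List.pyRange 0 (((r :: t).length : Nat) : Int) 1)
      (PySem.List.pyRange 0 (r.length : Int) 1)
      (fun i j x y => (i, j) ≠ (x, y) ∧ pygcd (pvCell (r :: t) i j) (pvCell (r :: t) x y) = 1)]
  refine congrArg (fun z => PySem.Int.floordiv z 2) ?_
  have hin : ∀ i ∈ PySem.List.pyRange 0 (((r :: t).length : Nat) : Int) 1,
      ((PySem.List.pyRange 0 (r.length : Int) 1).map (fun j =>
        ((PySem.List.pyRange 0 (((r :: t).length : Nat) : Int) 1).map (fun x =>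
          ((PySem.List.pyRange 0 (r.length : Int) 1).map (fun y =>
            if (i, j) ≠ (x, y) ∧ pygcd (pvCell (r :: t) i j) (pvCell (r :: t) x y) = 1
            then (1 : Int) else 0)).sum)).sum)).sum
      = ((PySem.List.pyRange 0 (r.length : Int) 1).map (fun j =>
          (((r :: t).flatMap (fun row => row.take r.length)).map
            (fun b => pvC (pvCell (r :: t) i j) b)).sum
          - pvC (pvCell (r :: t) i j) (pvCell (r :: t) i j))).sum := by
    intro i hi
    exact congrArg _ (List.map_congr_left (fun j hj =>
      pv_inner (r :: t) r.length i j hrect hi hj))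
  rw [List.map_congr_left hin,
      pv_grid_transfer (r :: t) r.length hrect
        (fun a => (((r :: t).flatMap (fun row => row.take r.length)).map
          (fun b => pvC a b)).sum - pvC a a)]

lemma pv_map_range_getD_id {α : Type} (n : Nat) (l : List α) (d : α) (hn : n ≤ l.length) :
    (List.range n).map (fun k => l.getD k d) = l.take n := by
  have h := pv_map_range_getD n l d id hn
  simpa using h

-- fold over range-indexed cells of one row = fold over the row's first n entries
lemma pv_foldl_row {β : Type} (n : Nat) (row : List Int) (hn : n ≤ row.length)
    (g : β → Int → β) (s : β) :
    (PySem.List.pyRange 0 (n : Int) 1).foldl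
        (fun s j => g s (PySem.List.pyGetD row j 0)) s
      = (row.take n).foldl g s := by
  rw [PySem.List.pyRange_zero_natCast, List.foldl_map]
  have h : (List.range n).foldl (fun s (k : Nat) => g s (PySem.List.pyGetD row (k : Int) 0)) s
      = ((List.range n).map (fun k => row.getD k 0)).foldl g s := by
    rw [List.foldl_map]
    exact PySem.List.foldl_congr_mem _ _ _ s
      (by intro acc k _; rw [PySem.List.pyGetD_natCast])
  rw [h, pv_map_range_getD_id n row 0 hn]

lemma pv_foldl_flat {β : Type} (grid : List (List Int)) (N : Nat) (g : β → Int → β) (s : β) :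
    grid.foldl (fun s row => (row.take N).foldl g s) s
      = (grid.flatMap (fun row => row.take N)).foldl g s := by
  induction grid generalizing s with
  | nil => simp
  | cons r t ih =>
    simp only [List.foldl_cons, List.flatMap_cons, List.foldl_append]
    exact ih _

-- fold over all range-indexed cells = fold over the flattened first-n-cells of each row
lemma pv_foldl_grid {β : Type} (grid : List (List Int)) (N : Nat)
    (hrect : ∀ row ∈ grid, N ≤ row.length) (g : β → Int → β) (s : β) :
    (PySem.List.pyRange 0 (grid.length : Int) 1).foldl (fun s i =>
        (PySem.List.pyRange 0 (N : Int) 1).foldl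
          (fun s j => g s (pvCell grid i j)) s) s
      = (grid.flatMap (fun row => row.take N)).foldl g s := by
  rw [PySem.List.pyRange_zero_natCast grid.length, List.foldl_map]
  have h1 : (List.range grid.length).foldl (fun s (k : Nat) =>
        (PySem.List.pyRange 0 (N : Int) 1).foldl
          (fun s j => g s (pvCell grid (k : Int) j)) s) s
      = ((List.range grid.length).map (fun k => grid.getD k [])).foldl
          (fun s row => (row.take N).foldl g s) s := by
    rw [List.foldl_map]
    refine PySem.List.foldl_congr_mem _ _ _ s ?_
    intro acc k hk
    have hk' : k < grid.length := List.mem_range.mp hk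
    have hrow : (grid.getD k []) ∈ grid := by
      rw [List.getD_eq_getElem grid [] hk']
      exact List.getElem_mem hk'
    have hcell : ∀ j : Int, pvCell grid (k : Int) j
        = PySem.List.pyGetD (grid.getD k []) j 0 := by
      intro j
      simp [pvCell, PySem.List.pyGetD_natCast]
    simp only [hcell]
    exact pv_foldl_row N (grid.getD k []) (hrect _ hrow) g acc
  rw [h1, pv_map_range_getD_id grid.length grid [] le_rfl, List.take_length]
  exact pv_foldl_flat grid N g s

-- B's double loop over counter items as a double sum over the distinct values
lemma pv_items_double (l : List Int) :
    ((PySem.Dict.counter l).items).foldl (fun acc p =>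
        ((PySem.Dict.counter l).items).foldl (fun acc q =>
          if pygcd p.1 q.1 = 1
          then acc + (if p.1 ≠ q.1 then p.2 * q.2 else p.2 * (p.2 - 1))
          else acc) acc) (0 : Int)
      = ((PySem.Set.ofList l).map (fun u =>
          ((PySem.Set.ofList l).map (fun v =>
            if pygcd u v = 1
            then (if u ≠ v then (l.count u : Int) * (l.count v : Int)
                  else (l.count u : Int) * ((l.count u : Int) - 1))
            else 0)).sum)).sum := by
  rw [PySem.Dict.items_counter]
  set K := PySem.Set.ofList l with hKdef
  rw [List.foldl_map]
  have hin : ∀ (u cu : Int) (a : Int),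
      (K.map (fun k => (k, (l.count k : Int)))).foldl (fun acc q =>
          if pygcd u q.1 = 1
          then acc + (if u ≠ q.1 then cu * q.2 else cu * (cu - 1))
          else acc) a
      = a + (K.map (fun v =>
          if pygcd u v = 1
          then (if u ≠ v then cu * (l.count v : Int) else cu * (cu - 1))
          else 0)).sum := by
    intro u cu a
    rw [List.foldl_map]
    rw [PySem.List.foldl_congr_mem K _
      (fun acc v => acc + (if pygcd u v = 1
        then (if u ≠ v then cu * (l.count v : Int) else cu * (cu - 1)) else 0)) a
      (by intro acc v _; dsimp; split_ifs <;> ring)]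
    exact PySem.List.foldl_add _ _ _
  rw [PySem.List.foldl_congr_mem K _
      (fun acc u => acc + (K.map (fun v =>
        if pygcd u v = 1
        then (if u ≠ v then (l.count u : Int) * (l.count v : Int)
              else (l.count u : Int) * ((l.count u : Int) - 1))
        else 0)).sum) 0
      (by intro acc u _; exact hin u (l.count u : Int) acc)]
  rw [PySem.List.foldl_add, zero_add]

-- the double sum over distinct values equals A's double sum over all cells
lemma pv_bridge (l : List Int) :
    ((PySem.Set.ofList l).map (fun u =>
        ((PySem.Set.ofList l).map (fun v =>
          if pygcd u v = 1
          then (if u ≠ v then (l.count u : Int) * (l.count v : Int)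
                else (l.count u : Int) * ((l.count u : Int) - 1))
          else 0)).sum)).sum
      = (l.map (fun a => (l.map (fun b => pvC a b)).sum - pvC a a)).sum := by
  have hK : (PySem.Set.ofList l).Nodup := PySem.Set.nodup_ofList l
  have hmem : ∀ a ∈ l, a ∈ PySem.Set.ofList l :=
    fun a ha => (PySem.Set.mem_ofList l a).mpr ha
  have hpt : ∀ u ∈ PySem.Set.ofList l,
      ((PySem.Set.ofList l).map (fun v =>
          if pygcd u v = 1
          then (if u ≠ v then (l.count u : Int) * (l.count v : Int)
                else (l.count u : Int) * ((l.count u : Int) - 1))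
          else 0)).sum
      = (l.count u : Int) * (l.map (fun b => pvC u b)).sum
        - (l.count u : Int) * pvC u u := by
    intro u hu
    have hterm : ∀ v ∈ PySem.Set.ofList l,
        (if pygcd u v = 1
          then (if u ≠ v then (l.count u : Int) * (l.count v : Int)
                else (l.count u : Int) * ((l.count u : Int) - 1))
          else 0)
        = (l.count u : Int) * ((l.count v : Int) * pvC u v)
          - (if u = v then (l.count u : Int) * pvC u u else 0) := by
      intro v _
      by_cases he : u = v
      · subst he
        simp only [pvC, ne_eq, not_true_eq_false, if_false]
        split_ifs <;> ring
      · simp only [pvC, if_neg he, ne_eq, if_pos he, sub_zero]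
        split_ifs <;> ring
    rw [List.map_congr_left hterm, pv_sum_map_sub,
        pv_sum_map_mul_left _ ((l.count u : Int)) (fun v => (l.count v : Int) * pvC u v),
        pv_count_sum l _ hK hmem (fun b => pvC u b)]
    have hd : ((PySem.Set.ofList l).map (fun v =>
        if u = v then (l.count u : Int) * pvC u u else 0)).sum
        = (l.count u : Int) * pvC u u :=
      pv_sum_delta _ hK u hu (fun _ => (l.count u : Int) * pvC u u)
    rw [hd]
  rw [List.map_congr_left hpt, pv_sum_map_sub]
  rw [pv_count_sum l _ hK hmem (fun a => (l.map (fun b => pvC a b)).sum),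
      pv_count_sum l _ hK hmem (fun a => pvC a a), ← pv_sum_map_sub]

lemma countWays_alt_eq (r : List Int) (t : List (List Int))
    (hrect : ∀ row ∈ r :: t, r.length ≤ row.length) :
    countWays_alt (r :: t) = PySem.Int.floordiv
      ((((r :: t).flatMap (fun row => row.take r.length)).map (fun a =>
          (((r :: t).flatMap (fun row => row.take r.length)).map
            (fun b => pvC a b)).sum - pvC a a)).sum) 2 := by
  have hg0 : PySem.List.pyGetD (r :: t) (0 : Int) [] = r := by
    simp
  unfold countWays_alt
  dsimp only
  rw [hg0]
  have hfreq := (pv_foldl_grid (r :: t) r.length hrect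
      (fun (d : PySem.Dict Int Int) v => d.insert v (d.getD v 0 + 1)) PySem.Dict.empty).trans
    (PySem.Dict.foldl_insert_getD_add_one_eq_counter
      ((r :: t).flatMap (fun row => row.take r.length)))
  beta_reduce at hfreq
  rw [hfreq, pv_items_double, pv_bridge]

-- ===== VERDICT (by name: the statement is the Claim_ definition above) =====
theorem countWays_spec : Claim_equal_countWays := by
  intro grid _ hPre
  obtain ⟨hne, hrect⟩ := hPre
  obtain ⟨r, t, rfl⟩ : ∃ r t, grid = r :: t := by
    cases grid with
    | nil => exact absurd rfl hne
    | cons r t => exact ⟨r, t, rfl⟩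
  have hrect' : ∀ row ∈ r :: t, r.length ≤ row.length := by
    intro row hrow
    simpa using hrect row hrow
  unfold Spec_countWays
  rw [countWays_eq r t hrect', countWays_alt_eq r t hrect']
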